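-- pv_equiv track=rewrite | github.com/TeogopK/Data_Structures_and_Algorithms_FMI | Exams/Seminar/Historical/final_exam_2024/Task1/py_solution_quadratic.py | solve
-- ===== SOURCE A (Python) =====
-- from collections import defaultdict
--
-- def solve(word):
--     for i in range(len(word)):
--         chars = defaultdict(int)
--
--         for j, ch in enumerate(word):
--             if i == j:
--                 continue
--             chars[ch] += 1
--
--         if len(set(chars.values())) == 1:
--             return True
--
--     return False
-- ===== SOURCE B (Python) =====
-- def solve(word):
--     cnt = {}
--     for ch in word:
--         cnt[ch] = cnt.get(ch, 0) + 1
--     for c in cnt: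
--         rest = {v - 1 if k == c else v for k, v in cnt.items()}
--         rest.discard(0)
--         if len(rest) == 1:
--             return True
--     return False
-- ===== Notes on version B (the rewrite author's own statement) =====
-- stated objective: faster
-- what changed: B counts all characters once and, for each distinct character, checks whether the counts with that one character decremented (zeros dropped) are all equal, instead of rebuilding a full frequency dict for every removal index.
import Mathlib
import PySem

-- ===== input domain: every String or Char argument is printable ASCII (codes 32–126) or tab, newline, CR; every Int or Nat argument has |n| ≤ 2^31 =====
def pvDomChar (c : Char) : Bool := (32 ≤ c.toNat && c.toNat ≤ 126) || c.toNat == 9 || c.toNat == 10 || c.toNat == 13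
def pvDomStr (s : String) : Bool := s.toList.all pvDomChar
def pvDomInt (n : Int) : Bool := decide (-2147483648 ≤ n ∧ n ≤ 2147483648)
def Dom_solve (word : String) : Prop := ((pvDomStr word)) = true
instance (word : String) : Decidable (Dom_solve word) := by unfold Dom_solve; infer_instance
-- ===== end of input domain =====

-- B counts all characters once and tests, for each DISTINCT character, whether dropping one
-- occurrence of it leaves all remaining counts equal, instead of A's rebuilding a frequency
-- dict for every removal INDEX (objective: faster).

-- ===== PORT A =====
def solve (word : String) : Bool :=
  (PySem.List.pyRange 0 (PySem.Str.len word) 1).any (fun i =>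
    let chars := (PySem.List.enumerate word.toList 0).foldl
      (fun d p => if i == p.1 then d else d.modify p.2 0 (· + 1))
      (PySem.Dict.empty : PySem.Dict Char Int)
    PySem.Set.len (PySem.Set.ofList chars.values) == 1)

-- ===== PORT B =====
def solve_alt (word : String) : Bool :=
  let cnt := word.toList.foldl (fun d ch => d.insert ch (d.getD ch 0 + 1))
    (PySem.Dict.empty : PySem.Dict Char Int)
  cnt.keys.any (fun c =>
    let rest := PySem.Set.ofList (cnt.items.map (fun p => if p.1 == c then p.2 - 1 else p.2))
    PySem.Set.len (PySem.Set.discard rest 0) == 1)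

-- ===== PRECONDITION & SPEC =====
def Spec_solve (word : String) (out : Bool) : Prop := out = solve_alt word
instance (word : String) (out : Bool) : Decidable (Spec_solve word out) := by unfold Spec_solve; infer_instance

-- ===== CLAIM (what is proved, stated in full; the proofs are below) =====
def Claim_equal_solve : Prop := ∀ (word : String), Dom_solve word → Spec_solve word (solve word)

-- ===== LEMMAS AND PROOFS =====

-- A's skip-one-index loop is a plain counting loop over the pairs that survive the skip test
lemma pv_foldl_skip (xs : List (Int × Char)) (i : Int) (d : PySem.Dict Char Int) :
    xs.foldl (fun d p => if i == p.1 then d else d.modify p.2 0 (· + 1)) d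
      = (xs.filter (fun p => !(i == p.1))).foldl (fun d p => d.modify p.2 0 (· + 1)) d := by
  induction xs generalizing d with
  | nil => rfl
  | cons x t ih =>
      rw [List.filter_cons]
      cases hc : (i == x.1) with
      | true =>
          simp only [List.foldl_cons, hc, Bool.not_true, Bool.false_eq_true, if_false]
          exact ih d
      | false =>
          simp only [List.foldl_cons, hc, Bool.false_eq_true, if_false, Bool.not_false, if_true]
          exact ih _

lemma pv_filter_enumerate_lt (l : List Char) (s i : Int) (h : i < s) :
    (PySem.List.enumerate l s).filter (fun p => !(i == p.1)) = PySem.List.enumerate l s := by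
  rw [List.filter_eq_self]
  intro p hp
  obtain ⟨k, hk, rfl⟩ := (PySem.List.mem_enumerate_iff l s p).mp hp
  simp only [Bool.not_eq_eq_eq_not, Bool.not_true, beq_eq_false_iff_ne, ne_eq]
  omega

-- the characters surviving the skip of index j are exactly the word with index j erased
lemma pv_filter_enumerate (l : List Char) (s : Int) (j : Nat) (h : j < l.length) :
    ((PySem.List.enumerate l s).filter (fun p => !((s + (j : Int)) == p.1))).map (·.2)
      = l.eraseIdx j := by
  induction l generalizing s j with
  | nil => simp at h
  | cons a t ih =>
      rw [PySem.List.enumerate_cons]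
      cases j with
      | zero =>
          rw [show s + ((0 : Nat) : Int) = s from by simp]
          rw [List.filter_cons]
          simp only [beq_self_eq_true, Bool.not_true, Bool.false_eq_true, if_false]
          rw [pv_filter_enumerate_lt t (s + 1) s (by omega), PySem.List.map_snd_enumerate]
          simp [List.eraseIdx]
      | succ j =>
          rw [show s + ((j + 1 : Nat) : Int) = (s + 1) + (j : Int) from by push_cast; ring]
          rw [List.filter_cons]
          have h0 : ((s + 1) + (j : Int) == s) = false := by
            simp only [beq_eq_false_iff_ne, ne_eq]; omega
          simp only [h0, Bool.not_false, if_true]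
          rw [List.map_cons, ih (s + 1) j (by simpa using h)]
          simp [List.eraseIdx]

lemma pv_eraseIdx_eq (l : List Char) (j : Nat) :
    l.eraseIdx j = l.take j ++ l.drop (j + 1) := by
  induction l generalizing j with
  | nil => simp
  | cons a t ih => cases j <;> simp [List.eraseIdx, ih]

lemma pv_count_eraseIdx (l : List Char) (j : Nat) (h : j < l.length) (a : Char) :
    (l.eraseIdx j).count a = l.count a - (if a = l[j] then 1 else 0) := by
  have hl : l = l.take j ++ l[j] :: l.drop (j + 1) := by
    conv_lhs => rw [← List.take_append_drop (j + 1) l]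
    rw [← List.take_append_getElem h]
    simp
  have hcnt := congrArg (fun s : List Char => s.count a) hl
  simp only [List.count_append, List.count_cons] at hcnt
  rw [pv_eraseIdx_eq, List.count_append, hcnt]
  by_cases hx : a = l[j]
  · simp [hx]
  · have : (l[j] == a) = false := beq_eq_false_iff_ne.mpr (fun e => hx e.symm)
    simp [hx, this]

-- the values of Counter(l') are exactly the counts of the members of l'
lemma pv_memA (l' : List Char) (x : Int) :
    x ∈ (PySem.Dict.counter l').values
      ↔ ∃ k, k ∈ l' ∧ x = (l'.count k : Int) := by
  simp only [PySem.Dict.values, PySem.Dict.items_counter, List.map_map, List.mem_map,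
    Function.comp, PySem.Set.mem_ofList]
  constructor
  · rintro ⟨k, hk, rfl⟩; exact ⟨k, hk, rfl⟩
  · rintro ⟨k, hk, rfl⟩; exact ⟨k, hk, rfl⟩

-- membership in B's decremented, zero-free value set
lemma pv_memB (l : List Char) (c : Char) (x : Int) :
    x ∈ PySem.Set.discard (PySem.Set.ofList
          ((PySem.Dict.counter l).items.map (fun p => if p.1 == c then p.2 - 1 else p.2))) 0
      ↔ (∃ k, k ∈ l ∧ x = (if k = c then (l.count k : Int) - 1 else (l.count k : Int))) ∧ x ≠ 0 := by
  rw [PySem.Set.mem_discard]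
  simp only [PySem.Set.mem_ofList, PySem.Dict.items_counter, List.map_map, List.mem_map,
    Function.comp]
  constructor
  · rintro ⟨⟨k, hk, rfl⟩, hx⟩
    refine ⟨⟨k, hk, ?_⟩, hx⟩
    by_cases hkc : k = c <;> simp [hkc]
  · rintro ⟨⟨k, hk, rfl⟩, hx⟩
    refine ⟨⟨k, hk, ?_⟩, hx⟩
    by_cases hkc : k = c <;> simp [hkc]

-- A's per-index check at j equals B's per-character check at c = l[j]
lemma pv_check_eq (l : List Char) (j : Nat) (h : j < l.length) :
    (PySem.Set.len (PySem.Set.ofList (PySem.Dict.counter (l.eraseIdx j)).values) == 1)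
      = (PySem.Set.len (PySem.Set.discard (PySem.Set.ofList
            ((PySem.Dict.counter l).items.map (fun p => if p.1 == l[j] then p.2 - 1 else p.2))) 0) == 1) := by
  have hnd : (PySem.Set.discard (PySem.Set.ofList
      ((PySem.Dict.counter l).items.map (fun p => if p.1 == l[j] then p.2 - 1 else p.2))) 0).Nodup := by
    simpa [PySem.Set.discard] using
      List.Nodup.filter _ (PySem.Set.nodup_ofList
        ((PySem.Dict.counter l).items.map (fun p => if p.1 == l[j] then p.2 - 1 else p.2)))
  have hperm : (PySem.Set.ofList (PySem.Dict.counter (l.eraseIdx j)).values).Perm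
      (PySem.Set.discard (PySem.Set.ofList
        ((PySem.Dict.counter l).items.map (fun p => if p.1 == l[j] then p.2 - 1 else p.2))) 0) := by
    rw [List.perm_ext_iff_of_nodup (PySem.Set.nodup_ofList _) hnd]
    intro x
    rw [PySem.Set.mem_ofList, pv_memA, pv_memB]
    constructor
    · rintro ⟨k, hk, rfl⟩
      have hcnt := pv_count_eraseIdx l j h k
      have hpos : 0 < (l.eraseIdx j).count k := List.count_pos_iff.mpr hk
      have hkl : k ∈ l := (List.eraseIdx_sublist l j).mem hk
      have hposl : 0 < l.count k := List.count_pos_iff.mpr hkl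
      refine ⟨⟨k, hkl, ?_⟩, by exact_mod_cast Nat.pos_iff_ne_zero.mp hpos⟩
      by_cases hkc : k = l[j]
      · rw [hcnt, if_pos hkc, if_pos hkc]
        rw [if_pos hkc] at hcnt
        push_cast [Nat.cast_sub (by omega : 1 ≤ l.count k)]
        ring
      · rw [hcnt, if_neg hkc, if_neg hkc]
        simp
    · rintro ⟨⟨k, hk, rfl⟩, hx⟩
      have hcnt := pv_count_eraseIdx l j h k
      have hposl : 0 < l.count k := List.count_pos_iff.mpr hk
      refine ⟨k, ?_, ?_⟩
      · rw [← List.count_pos_iff (a := k) (l := l.eraseIdx j), hcnt]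
        by_cases hkc : k = l[j]
        · rw [if_pos hkc]
          rw [if_pos hkc] at hx
          have h1 : (l.count k : Int) - 1 ≠ 0 := hx
          omega
        · rw [if_neg hkc]; omega
      · rw [hcnt]
        by_cases hkc : k = l[j]
        · rw [if_pos hkc]
          rw [if_pos hkc] at hx ⊢
          push_cast [Nat.cast_sub (by omega : 1 ≤ l.count k)]
          ring
        · rw [if_neg hkc, if_neg hkc]
          simp
  have hlen := hperm.length_eq
  simp only [PySem.Set.len, hlen]

lemma pv_foldl_snd (xs : List (Int × Char)) (d : PySem.Dict Char Int) :
    xs.foldl (fun d p => d.modify p.2 0 (· + 1)) d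
      = (xs.map (·.2)).foldl (fun d c => d.modify c 0 (· + 1)) d := by
  rw [List.foldl_map]

-- A's inner dict at removal index j is the counter of the word with index j erased
lemma pv_inner_dict (l : List Char) (j : Nat) (h : j < l.length) :
    (PySem.List.enumerate l 0).foldl
        (fun d p => if ((j : Int)) == p.1 then d else d.modify p.2 0 (· + 1))
        (PySem.Dict.empty : PySem.Dict Char Int)
      = PySem.Dict.counter (l.eraseIdx j) := by
  have hfe := pv_filter_enumerate l 0 j h
  rw [show (0 : Int) + (j : Int) = (j : Int) from by ring] at hfe
  rw [pv_foldl_skip, pv_foldl_snd, hfe, PySem.Dict.counter_eq_foldl]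

-- ===== VERDICT (by name: the statement is the Claim_ definition above) =====
theorem solve_spec : Claim_equal_solve := by
  intro word _
  unfold Spec_solve solve solve_alt
  rw [Bool.eq_iff_iff]
  simp only [List.any_eq_true]
  simp only [PySem.Dict.foldl_insert_getD_add_one_eq_counter, PySem.Dict.keys_counter]
  have hlen : PySem.Str.len word = (word.toList.length : Int) := by
    simp [PySem.Str.len]
  constructor
  · rintro ⟨i, hi, hP⟩
    rw [PySem.List.mem_pyRange_one, hlen] at hi
    obtain ⟨j, rfl⟩ : ∃ j : Nat, i = (j : Int) := ⟨i.toNat, by omega⟩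
    have hj : j < word.toList.length := by exact_mod_cast hi.2
    refine ⟨word.toList[j], (PySem.Set.mem_ofList _ _).mpr (word.toList.getElem_mem hj), ?_⟩
    rw [pv_inner_dict word.toList j hj] at hP
    rw [← pv_check_eq word.toList j hj]
    exact hP
  · rintro ⟨c, hc, hQ⟩
    rw [PySem.Set.mem_ofList] at hc
    obtain ⟨j, hj, rfl⟩ := List.mem_iff_getElem.mp hc
    refine ⟨(j : Int), ?_, ?_⟩
    · rw [PySem.List.mem_pyRange_one, hlen]
      constructor
      · omega
      · exact_mod_cast hj
    · rw [pv_inner_dict word.toList j hj, pv_check_eq word.toList j hj]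
      exact hQ
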